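-- pv_equiv track=rewrite | github.com/sigersteenstra/palindromicambigram | src/logic.py | is_ambigram
-- ===== SOURCE A (Python) =====
-- ambinums = {0:0,1:1,2:2,5:5,6:9,8:8,9:6}
--
-- not_ambinums = [3,4,7]
--
-- def is_ambigram(date_text: str):
--     for num in not_ambinums:
--         if str(num) in date_text:
--             return False
--     reverse: str = date_text[::-1]
--     upsreverse: str = ''
--     for i in range(0, len(reverse)):
--         key = int(reverse[i])
--         upsreverse = upsreverse + str(ambinums.get(key))
--     if date_text == upsreverse:
--         return True
--     return False
-- ===== SOURCE B (Python) =====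
-- ambinums = {0:0,1:1,2:2,5:5,6:9,8:8,9:6}
--
-- not_ambinums = [3,4,7]
--
-- def is_ambigram(date_text: str):
--     for num in not_ambinums:
--         if str(num) in date_text:
--             return False
--     n = len(date_text)
--     for i in range(n):
--         if date_text[i] != str(ambinums.get(int(date_text[n - 1 - i]))):
--             return False
--     return True
-- ===== Notes on version B (the rewrite author's own statement) =====
-- stated objective: alternative
-- what changed: Instead of building the reversed, digit-rotated string and comparing it to the input, B does one two-pointer pass comparing date_text[i] directly against the rotation of date_text[n-1-i], returning False at the first mismatch; no intermediate string is constructed.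
import Mathlib
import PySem

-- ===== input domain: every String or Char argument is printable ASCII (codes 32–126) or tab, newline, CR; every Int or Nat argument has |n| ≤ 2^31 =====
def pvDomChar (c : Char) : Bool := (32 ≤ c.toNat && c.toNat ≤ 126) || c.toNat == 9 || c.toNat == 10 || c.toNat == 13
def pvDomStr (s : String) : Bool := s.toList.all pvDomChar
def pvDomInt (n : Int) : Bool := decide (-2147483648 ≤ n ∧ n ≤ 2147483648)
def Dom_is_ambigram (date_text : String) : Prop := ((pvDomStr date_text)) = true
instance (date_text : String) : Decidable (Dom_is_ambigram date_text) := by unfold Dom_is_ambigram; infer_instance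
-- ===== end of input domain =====

-- B replaces A's build-reversed-rotated-string-then-compare with a single pairwise
-- comparison pass (two-pointer, early exit); alternative decomposition, same cost.


-- ===== PORT A =====
def pvAmbinums : PySem.Dict Int Int := PySem.Dict.ofList [(0,0),(1,1),(2,2),(5,5),(6,9),(8,8),(9,6)]
def pvNotAmbinums : List Int := [3,4,7]

-- str(x) for x : Optional[int]  (str(None) = "None")
def pvStrOptInt (o : Option Int) : List Char :=
  match o with
  | none => "None".toList
  | some v => PySem.Int.toChars v

-- A's second loop: for i in range(len(reverse)): upsreverse += str(ambinums.get(int(reverse[i])))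
-- (none = the ValueError int() raises on a non-digit character; excluded by Pre_)
def pvBuildA (acc : List Char) : List Char → Option (List Char)
  | [] => some acc
  | c :: rest =>
    match PySem.Int.ofChars? [c] with
    | none => none
    | some key => pvBuildA (acc ++ pvStrOptInt (PySem.Dict.get? pvAmbinums key)) rest

def is_ambigram (date_text : String) : Bool :=
  if pvNotAmbinums.any (fun num => PySem.Str.isIn (PySem.Int.toStr num) date_text) then false
  else
    let reverse : List Char := (PySem.List.slice? date_text.toList none none (-1)).getD []
    match pvBuildA [] reverse with
    | none => false   -- Python raises ValueError here; excluded by Pre_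
    | some upsreverse => if date_text.toList = upsreverse then true else false

-- ===== PORT B =====
-- B's pairwise loop: for i in range(n): if date_text[i] != str(ambinums.get(int(date_text[n-1-i]))): return False
def pvPairB (s : List Char) (n : Nat) (i : Nat) : Bool :=
  if _h : i < n then
    match PySem.List.pyGet? s (i : Int), PySem.List.pyGet? s ((n : Int) - 1 - (i : Int)) with
    | some ci, some cj =>
      (match PySem.Int.ofChars? [cj] with
       | none => false   -- Python raises ValueError here; excluded by Pre_
       | some key =>
         if [ci] = pvStrOptInt (PySem.Dict.get? pvAmbinums key) then pvPairB s n (i + 1) else false)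
    | _, _ => false      -- unreachable: both indices are in range when i < n
  else true
termination_by n - i

def is_ambigram_alt (date_text : String) : Bool :=
  if pvNotAmbinums.any (fun num => PySem.Str.isIn (PySem.Int.toStr num) date_text) then false
  else pvPairB date_text.toList date_text.toList.length 0

-- ===== PRECONDITION & SPEC =====
-- Pre_ excludes exactly the strings that contain a non-digit character and none of the three
-- non-rotatable digits: there A raises ValueError from int().  (When a non-rotatable digit
-- occurs A returns False before int(); otherwise all characters must be digits, and since the
-- non-rotatable digits are absent they lie in the rotatable set pvGood.)
def Pre_is_ambigram (date_text : String) : Prop :=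
  PySem.Str.isIn "3" date_text = true ∨ PySem.Str.isIn "4" date_text = true ∨
  PySem.Str.isIn "7" date_text = true ∨
  date_text.toList.all (fun c => c ∈ ['0','1','2','5','6','8','9']) = true
instance (date_text : String) : Decidable (Pre_is_ambigram date_text) := by
  unfold Pre_is_ambigram; infer_instance
def pvWitness_is_ambigram : String := "1961"
def Spec_is_ambigram (date_text : String) (out : Bool) : Prop := out = is_ambigram_alt date_text
instance (date_text : String) (out : Bool) : Decidable (Spec_is_ambigram date_text out) := by unfold Spec_is_ambigram; infer_instance

-- ===== CLAIM (what is proved, stated in full; the proofs are below) =====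
def Claim_equal_is_ambigram : Prop := ∀ (date_text : String), Dom_is_ambigram date_text → Pre_is_ambigram date_text → Spec_is_ambigram date_text (is_ambigram date_text)

-- ===== LEMMAS AND PROOFS =====

-- the rotation each good digit character undergoes
def pvRotc : Char → Char
  | '6' => '9'
  | '9' => '6'
  | c => c

def pvGood : List Char := ['0','1','2','5','6','8','9']

-- integer value of a good digit character
def pvDigitVal : Char → Int
  | '0' => 0 | '1' => 1 | '2' => 2 | '5' => 5 | '6' => 6 | '8' => 8 | '9' => 9 | _ => 0

lemma pvCharStep (c : Char) (h : c ∈ pvGood) :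
    PySem.Int.ofChars? [c] = some (pvDigitVal c) ∧
    pvStrOptInt (PySem.Dict.get? pvAmbinums (pvDigitVal c)) = [pvRotc c] := by
  fin_cases h <;> exact ⟨by decide, by decide⟩

lemma pvBuildA_good (l : List Char) (hG : ∀ c ∈ l, c ∈ pvGood) (acc : List Char) :
    pvBuildA acc l = some (acc ++ l.map pvRotc) := by
  induction l generalizing acc with
  | nil => simp [pvBuildA]
  | cons c rest ih =>
    obtain ⟨h1, h2⟩ := pvCharStep c (hG c (by simp))
    simp [pvBuildA, h1, h2, ih (fun d hd => hG d (by simp [hd]))]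

lemma pvPairB_iff (s : List Char) (hG : ∀ c ∈ s, c ∈ pvGood) :
    ∀ k i, s.length - i ≤ k →
      (pvPairB s s.length i = true ↔
        ∀ j, i ≤ j → (h : j < s.length) → s[j] = pvRotc (s[s.length - 1 - j]'(by omega))) := by
  intro k
  induction k with
  | zero =>
    intro i hk
    rw [pvPairB]
    have hi : ¬ i < s.length := by omega
    rw [dif_neg hi]
    constructor
    · intro _ j hij hj; omega
    · intro _; rfl
  | succ k ih =>
    intro i hk
    rw [pvPairB]
    by_cases hi : i < s.length
    · have hj' : s.length - 1 - i < s.length := by omega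
      have e1 : PySem.List.pyGet? s (i : Int) = some (s[i]) := by
        rw [PySem.List.pyGet?_natCast]
        exact List.getElem?_eq_getElem hi
      have e2 : PySem.List.pyGet? s ((s.length : Int) - 1 - (i : Int)) = some (s[s.length - 1 - i]) := by
        have hc : (s.length : Int) - 1 - (i : Int) = ((s.length - 1 - i : Nat) : Int) := by omega
        rw [hc, PySem.List.pyGet?_natCast]
        exact List.getElem?_eq_getElem hj'
      obtain ⟨h1, h2⟩ := pvCharStep _ (hG _ (List.getElem_mem hj'))
      rw [dif_pos hi, e1, e2]
      simp only [h1, h2]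
      by_cases heq : s[i] = pvRotc (s[s.length - 1 - i])
      · rw [if_pos (by rw [heq]), ih (i + 1) (by omega)]
        constructor
        · intro h j hij hj
          rcases Nat.eq_or_lt_of_le hij with rfl | hlt
          · exact heq
          · exact h j hlt hj
        · intro h j hij hj
          exact h j (by omega) hj
      · have hne : ¬ ([s[i]] = [pvRotc (s[s.length - 1 - i])]) := by simpa using heq
        rw [if_neg hne]
        constructor
        · intro hfalse; cases hfalse
        · intro h; exact absurd (h i le_rfl hi) heq
    · rw [dif_neg hi]
      constructor
      · intro _ j hij hj; omega
      · intro _; rfl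

lemma pvRev_iff (L : List Char) :
    (L = L.reverse.map pvRotc) ↔
      (∀ j, 0 ≤ j → (h : j < L.length) → L[j] = pvRotc (L[L.length - 1 - j]'(by omega))) := by
  constructor
  · intro hEq j _ hj
    rw [List.getElem_of_eq hEq hj, List.getElem_map, List.getElem_reverse]
  · intro h
    apply List.ext_getElem (by simp)
    intro j h1 h2
    rw [List.getElem_map, List.getElem_reverse]
    exact h j (Nat.zero_le _) h1

-- ===== VERDICT (by name: the statement is the Claim_ definition above) =====
theorem is_ambigram_spec : Claim_equal_is_ambigram := by
  intro date_text _ hpre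
  unfold Spec_is_ambigram
  by_cases hg : pvNotAmbinums.any (fun num => PySem.Str.isIn (PySem.Int.toStr num) date_text) = true
  · rw [is_ambigram, is_ambigram_alt, if_pos hg, if_pos hg]
  · have hg' := hg
    simp only [pvNotAmbinums, List.any_cons, List.any_nil, Bool.or_eq_true, not_or,
      Bool.or_false] at hg'
    have hall : ∀ c ∈ date_text.toList, c ∈ pvGood := by
      rcases hpre with h3 | h4 | h7 | hd
      · exact absurd h3 (by simpa using hg'.1)
      · exact absurd h4 (by simpa using hg'.2.1)
      · exact absurd h7 (by simpa using hg'.2.2)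
      · intro c hc
        have := List.all_eq_true.mp hd c hc
        simpa [pvGood] using this
    rw [is_ambigram, is_ambigram_alt, if_neg hg, if_neg hg]
    set L := date_text.toList with hL
    have hrev : (PySem.List.slice? L none none (-1)).getD ([] : List Char) = L.reverse := by
      rw [PySem.List.slice?_none_none_neg_one]; rfl
    have hallrev : ∀ c ∈ L.reverse, c ∈ pvGood := fun c hc => hall c (List.mem_reverse.mp hc)
    simp only [hrev, pvBuildA_good L.reverse hallrev [], List.nil_append]
    have hpb := pvPairB_iff L hall L.length 0 (by omega)
    by_cases hLE : L = L.reverse.map pvRotc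
    · rw [if_pos hLE]
      exact (hpb.mpr (fun j hij hj => (pvRev_iff L).mp hLE j hij hj)).symm
    · rw [if_neg hLE]
      cases hB : pvPairB L L.length 0 with
      | false => rfl
      | true =>
        exact absurd ((pvRev_iff L).mpr (fun j hij hj => hpb.mp hB j hij hj)) hLE
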